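-- pv_equiv track=rewrite | github.com/IllyaStarikov/academia | src/cs5200-analysis-of-algorithms/homework-8/source/problem-8-2.py | bonnie_and_clyde
-- ===== SOURCE A (Python) =====
-- def bonnie_and_clyde(coins):
--     coins_sorted = sorted(coins)
--
--     bonnie_coins, clyde_coins = [], []
--
--     while coins_sorted != []:
--         bonnie_coins += [coins_sorted.pop()]
--
--         while sum(bonnie_coins) != sum(clyde_coins):
--             if not coins_sorted:
--                 return [None, None]
--
--             clyde_coins += [coins_sorted.pop(0)]
--
--     return [bonnie_coins, clyde_coins]
-- ===== SOURCE B (Python) =====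
-- def bonnie_and_clyde(coins):
--     arr = sorted(coins)
--     bonnie, clyde = [], []
--     bsum = csum = 0
--     lo, hi = 0, len(arr) - 1
--     while lo <= hi:
--         x = arr[hi]
--         hi -= 1
--         bonnie.append(x)
--         bsum += x
--         while bsum != csum:
--             if lo > hi:
--                 return [None, None]
--             y = arr[lo]
--             lo += 1
--             clyde.append(y)
--             csum += y
--     return [bonnie, clyde]
-- ===== Notes on version B (the rewrite author's own statement) =====
-- stated objective: faster
-- what changed: Replaces A's list mutation (pop()/pop(0), which shifts the whole list) and full re-summation of both piles on every inner iteration with two index pointers into the sorted array and incrementally maintained running sums.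
import Mathlib
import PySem

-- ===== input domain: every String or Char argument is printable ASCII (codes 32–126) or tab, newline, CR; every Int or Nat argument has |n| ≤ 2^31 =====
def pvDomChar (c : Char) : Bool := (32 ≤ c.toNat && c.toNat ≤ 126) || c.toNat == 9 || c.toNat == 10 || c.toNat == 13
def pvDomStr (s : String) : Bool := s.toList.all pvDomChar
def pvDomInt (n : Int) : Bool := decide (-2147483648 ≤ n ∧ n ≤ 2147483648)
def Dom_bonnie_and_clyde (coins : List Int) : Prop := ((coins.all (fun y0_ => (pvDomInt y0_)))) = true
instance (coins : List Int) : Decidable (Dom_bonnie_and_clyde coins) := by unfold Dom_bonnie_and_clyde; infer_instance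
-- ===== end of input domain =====

-- B replaces A's pop()/pop(0) list mutation and per-iteration re-summation with two index
-- pointers into the sorted array and incrementally maintained running sums (measurably faster).


-- ===== PORT A =====

-- inner 'while sum(bonnie_coins) != sum(clyde_coins)' loop of A: pops from the front of cs into c;
-- returns none on 'return [None, None]', otherwise the remaining cs and the grown clyde pile.
def pvAInner (cs b c : List Int) : Option (List Int × List Int) :=
  if b.sum ≠ c.sum then
    match cs with
    | [] => none
    | x :: rest => pvAInner rest b (c ++ [x])
  else some (cs, c)

-- outer 'while coins_sorted != []' loop of A: pops the last element into bonnie, then runs the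
-- inner loop.  fuel is a totality guard only: each iteration consumes at least one coin, so the
-- initial fuel of length+1 is never exhausted.
def pvAOuter (fuel : Nat) (cs b c : List Int) : List (Option (List Int)) :=
  match fuel with
  | 0 => [none, none]
  | Nat.succ f =>
    match cs with
    | [] => [some b, some c]
    | z :: zs =>
      match pvAInner ((z :: zs).dropLast) (b ++ [(z :: zs).getLast (by simp)]) c with
      | none => [none, none]
      | some (cs', c') => pvAOuter f cs' (b ++ [(z :: zs).getLast (by simp)]) c'

def bonnie_and_clyde (coins : List Int) : List (Option (List Int)) :=
  pvAOuter (coins.length + 1) (PySem.List.sorted coins (fun v => v) false) [] []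

-- ===== PORT B =====

-- inner loop of B: advances lo, accumulating arr[lo] into clyde/csum, until bsum = csum;
-- none on 'return [None, None]'.  arr[lo] is in range whenever read (lo ≤ hi guard), so getD is
-- exact.  fuel is a totality guard only (each step moves lo up, bounded by hi).
def pvBInner (fuel : Nat) (arr : List Int) (lo hi : Int) (clyde : List Int) (bsum csum : Int) :
    Option (Int × List Int × Int) :=
  match fuel with
  | 0 => none
  | Nat.succ f =>
    if bsum ≠ csum then
      if lo > hi then none
      else
        pvBInner f arr (lo + 1) hi (clyde ++ [PySem.List.pyGetD arr lo 0]) bsum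
          (csum + PySem.List.pyGetD arr lo 0)
    else some (lo, clyde, csum)

-- outer loop of B over the two pointers; x = arr[hi] is inlined at its uses.
-- fuel is a totality guard only: hi - lo shrinks every iteration.
def pvBOuter (fuel : Nat) (arr : List Int) (lo hi : Int) (bonnie clyde : List Int)
    (bsum csum : Int) : List (Option (List Int)) :=
  match fuel with
  | 0 => [none, none]
  | Nat.succ f =>
    if lo ≤ hi then
      match pvBInner (f + 1) arr lo (hi - 1) clyde (bsum + PySem.List.pyGetD arr hi 0) csum with
      | none => [none, none]
      | some (lo', clyde', csum') =>
        pvBOuter f arr lo' (hi - 1) (bonnie ++ [PySem.List.pyGetD arr hi 0]) clyde'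
          (bsum + PySem.List.pyGetD arr hi 0) csum'
    else [some bonnie, some clyde]

def bonnie_and_clyde_alt (coins : List Int) : List (Option (List Int)) :=
  let arr := PySem.List.sorted coins (fun v => v) false
  pvBOuter (arr.length + 1) arr 0 ((arr.length : Int) - 1) [] [] 0 0

-- ===== PRECONDITION & SPEC =====
def Spec_bonnie_and_clyde (coins : List Int) (out : List (Option (List Int))) : Prop := out = bonnie_and_clyde_alt coins
instance (coins : List Int) (out : List (Option (List Int))) : Decidable (Spec_bonnie_and_clyde coins out) := by unfold Spec_bonnie_and_clyde; infer_instance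

-- ===== CLAIM (what is proved, stated in full; the proofs are below) =====
def Claim_equal_bonnie_and_clyde : Prop := ∀ (coins : List Int), Dom_bonnie_and_clyde coins → Spec_bonnie_and_clyde coins (bonnie_and_clyde coins)

-- ===== LEMMAS AND PROOFS =====

-- the contiguous segment arr[lo..hi] that A's shrinking working list corresponds to
def pvSeg (arr : List Int) (lo hi : Int) : List Int :=
  (arr.take (hi + 1).toNat).drop lo.toNat

theorem pvSeg_nil (arr : List Int) (lo hi : Int) (h0 : 0 ≤ lo) (hhi : hi < lo) :
    pvSeg arr lo hi = [] := by
  unfold pvSeg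
  apply List.drop_eq_nil_of_le
  have : (arr.take (hi + 1).toNat).length ≤ (hi + 1).toNat := by
    simp [List.length_take]
  omega

theorem pvSeg_cons (arr : List Int) (lo hi : Int) (h0 : 0 ≤ lo) (hle : lo ≤ hi)
    (hhi : hi < (arr.length : Int)) :
    pvSeg arr lo hi = arr[lo.toNat]'(by omega) :: pvSeg arr (lo + 1) hi := by
  unfold pvSeg
  have hlen : lo.toNat < (arr.take (hi + 1).toNat).length := by
    simp [List.length_take]
    omega
  rw [List.drop_eq_getElem_cons hlen]
  congr 1
  · exact List.getElem_take
  · congr 1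
    omega

theorem pvSeg_last (arr : List Int) (lo hi : Int) (h0 : 0 ≤ lo) (hle : lo ≤ hi)
    (hhi : hi < (arr.length : Int)) (hne : pvSeg arr lo hi ≠ []) :
    (pvSeg arr lo hi).getLast hne = arr[hi.toNat]'(by omega) := by
  have hlen : (pvSeg arr lo hi).length = (hi + 1).toNat - lo.toNat := by
    unfold pvSeg
    simp [List.length_take, List.length_drop]
    omega
  rw [List.getLast_eq_getElem]
  unfold pvSeg
  rw [List.getElem_drop, List.getElem_take]
  congr 1
  rw [show ((arr.take (hi + 1).toNat).drop lo.toNat) = pvSeg arr lo hi from rfl, hlen]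
  omega

theorem pvSeg_dropLast (arr : List Int) (lo hi : Int) (h0 : 0 ≤ lo) (hle : lo ≤ hi)
    (hhi : hi < (arr.length : Int)) :
    (pvSeg arr lo hi).dropLast = pvSeg arr lo (hi - 1) := by
  unfold pvSeg
  apply List.ext_getElem
  · simp [List.length_take, List.length_drop]
    omega
  · intro i h1 h2
    simp only [List.getElem_dropLast, List.getElem_drop, List.getElem_take]

theorem pvAOuter_succ_nil (f : Nat) (b c : List Int) :
    pvAOuter (f + 1) [] b c = [some b, some c] := by
  rw [pvAOuter]

theorem pvAOuter_succ_ne_nil (f : Nat) (cs b c : List Int) (h : cs ≠ []) :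
    pvAOuter (f + 1) cs b c =
      (match pvAInner cs.dropLast (b ++ [cs.getLast h]) c with
       | none => [none, none]
       | some (cs', c') => pvAOuter f cs' (b ++ [cs.getLast h]) c') := by
  match cs with
  | z :: zs => rw [pvAOuter]

theorem pvInner_corr (arr : List Int) : ∀ (fuel : Nat) (lo hi : Int) (b c : List Int)
    (bsum csum : Int),
    0 ≤ lo → hi < (arr.length : Int) → (hi + 1 - lo).toNat < fuel →
    bsum = b.sum → csum = c.sum →
    (match pvBInner fuel arr lo hi c bsum csum with
     | none => pvAInner (pvSeg arr lo hi) b c = none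
     | some (lo', c', csum') =>
         pvAInner (pvSeg arr lo hi) b c = some (pvSeg arr lo' hi, c') ∧
         csum' = c'.sum ∧ lo ≤ lo') := by
  intro fuel
  induction fuel with
  | zero =>
    intro lo hi b c bsum csum h0 hhi hfuel hb hc
    omega
  | succ f ih =>
    intro lo hi b c bsum csum h0 hhi hfuel hb hc
    by_cases heq : bsum = csum
    · rw [pvBInner, if_neg (by omega)]
      exact ⟨by rw [pvAInner.eq_def, if_neg (by omega : ¬ b.sum ≠ c.sum)], hc, le_refl lo⟩
    · by_cases hgt : lo > hi
      · rw [pvBInner, if_pos (by omega), if_pos hgt]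
        rw [pvAInner.eq_def, if_pos (by omega : b.sum ≠ c.sum),
          pvSeg_nil arr lo hi h0 (by omega)]
      · rw [pvBInner, if_pos (by omega), if_neg hgt]
        have hlt : lo < (arr.length : Int) := by omega
        have hy := PySem.List.pyGetD_eq_getElem (i := lo) arr 0 h0 hlt
        have hA : pvAInner (pvSeg arr lo hi) b c
            = pvAInner (pvSeg arr (lo + 1) hi) b (c ++ [PySem.List.pyGetD arr lo 0]) := by
          rw [pvAInner.eq_def, if_pos (by omega : b.sum ≠ c.sum),
            pvSeg_cons arr lo hi h0 (by omega) hhi, hy]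
        have hrec := ih (lo + 1) hi b (c ++ [PySem.List.pyGetD arr lo 0]) bsum
          (csum + PySem.List.pyGetD arr lo 0) (by omega) hhi (by omega) hb (by simp [hc])
        revert hrec
        cases pvBInner f arr (lo + 1) hi (c ++ [PySem.List.pyGetD arr lo 0]) bsum
            (csum + PySem.List.pyGetD arr lo 0) with
        | none => intro hrec; simpa [hA] using hrec
        | some r =>
          obtain ⟨lo', c', csum'⟩ := r
          intro hrec
          exact ⟨hA ▸ hrec.1, hrec.2.1, by omega⟩

theorem pvOuter_corr (arr : List Int) : ∀ (fuel : Nat) (lo hi : Int) (b c : List Int)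
    (bsum csum : Int),
    0 ≤ lo → hi < (arr.length : Int) → (hi + 1 - lo).toNat < fuel →
    bsum = b.sum → csum = c.sum →
    pvAOuter fuel (pvSeg arr lo hi) b c = pvBOuter fuel arr lo hi b c bsum csum := by
  intro fuel
  induction fuel with
  | zero =>
    intro lo hi b c bsum csum h0 hhi hfuel hb hc
    omega
  | succ f ih =>
    intro lo hi b c bsum csum h0 hhi hfuel hb hc
    rw [pvBOuter]
    by_cases hle : lo ≤ hi
    · rw [if_pos hle]
      have hx := PySem.List.pyGetD_eq_getElem (i := hi) arr 0 (by omega) hhi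
      have hne : pvSeg arr lo hi ≠ [] := by
        rw [pvSeg_cons arr lo hi h0 hle hhi]; simp
      rw [pvAOuter_succ_ne_nil f _ _ _ hne]
      rw [pvSeg_last arr lo hi h0 hle hhi hne, pvSeg_dropLast arr lo hi h0 hle hhi, ← hx]
      have hinner := pvInner_corr arr (f + 1) lo (hi - 1)
        (b ++ [PySem.List.pyGetD arr hi 0]) c (bsum + PySem.List.pyGetD arr hi 0) csum
        h0 (by omega) (by omega) (by simp [hb]) hc
      split
      · rename_i heq1
        split
        · rfl
        · rename_i lo' clyde' csum' heq2
          rw [heq2] at hinner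
          simp only at hinner
          rw [heq1] at hinner
          exact absurd hinner.1 (by simp)
      · rename_i cs' c' heq1
        split
        · rename_i heq2
          rw [heq2] at hinner
          simp only at hinner
          rw [heq1] at hinner
          exact absurd hinner (by simp)
        · rename_i lo' clyde' csum' heq2
          rw [heq2] at hinner
          simp only at hinner
          rw [heq1] at hinner
          obtain ⟨h1, h2, h3⟩ := hinner
          obtain ⟨hseg', hcly⟩ : pvSeg arr lo' (hi - 1) = cs' ∧ clyde' = c' := by
            simpa [eq_comm] using h1
          rw [← hseg', ← hcly]
          exact ih lo' (hi - 1) (b ++ [PySem.List.pyGetD arr hi 0]) clyde'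
            (bsum + PySem.List.pyGetD arr hi 0) csum' (by omega) (by omega) (by omega)
            (by simp [hb]) h2
    · rw [if_neg hle]
      rw [pvSeg_nil arr lo hi h0 (by omega), pvAOuter_succ_nil]

-- ===== VERDICT (by name: the statement is the Claim_ definition above) =====
theorem bonnie_and_clyde_spec : Claim_equal_bonnie_and_clyde := by
  intro coins _
  unfold Spec_bonnie_and_clyde bonnie_and_clyde bonnie_and_clyde_alt
  show pvAOuter (coins.length + 1) (PySem.List.sorted coins (fun v => v) false) [] [] = _
  have hlen : (PySem.List.sorted coins (fun v => v) false).length = coins.length :=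
    PySem.List.length_sorted ..
  rw [← hlen]
  generalize PySem.List.sorted coins (fun v => v) false = arr
  have hseg : pvSeg arr 0 ((arr.length : Int) - 1) = arr := by
    unfold pvSeg
    simp
  have key := pvOuter_corr arr (arr.length + 1) 0 ((arr.length : Int) - 1) [] [] 0 0
    (by omega) (by omega) (by omega) rfl rfl
  rw [hseg] at key
  exact key
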